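-- pv_equiv track=rewrite | github.com/miliar/Code_Jam_Webscraper | solutions_python/Problem_201/109.py | solve
-- ===== SOURCE A (Python) =====
-- def solve(n, k):
-- 	k -= 1
-- 	if k == 0:
-- 		return n//2, (n-1)//2
--
-- 	if n % 2 == 0:
-- 		if k % 2 == 0:
-- 			return solve(n//2 - 1, k//2)
-- 		else:
-- 			return solve(n//2, k//2 + 1)
-- 	if k % 2 == 0:
-- 		return solve(n//2, k//2)
-- 	else:
-- 		return solve(n//2, k//2 + 1)
-- ===== SOURCE B (Python) =====
-- def solve(n, k):
--     # Closed form: the k-th person's segment has size m-1 where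
--     # m = floor((n + 2^(d+1) - k) / 2^d), d = floor(log2 k).
--     d = k.bit_length() - 1
--     p = 2 ** d
--     m = (n + 2 * p - k) // p
--     return (m - 1) // 2, (m - 2) // 2
-- ===== Notes on version B (the rewrite author's own statement) =====
-- stated objective: faster
-- what changed: Replaces the O(log k) four-way-parity recursion by a closed-form O(1) formula: with d = k.bit_length()-1, the segment value is m = (n + 2^(d+1) - k) // 2^d and the answer is ((m-1)//2, (m-2)//2).
import Mathlib
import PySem

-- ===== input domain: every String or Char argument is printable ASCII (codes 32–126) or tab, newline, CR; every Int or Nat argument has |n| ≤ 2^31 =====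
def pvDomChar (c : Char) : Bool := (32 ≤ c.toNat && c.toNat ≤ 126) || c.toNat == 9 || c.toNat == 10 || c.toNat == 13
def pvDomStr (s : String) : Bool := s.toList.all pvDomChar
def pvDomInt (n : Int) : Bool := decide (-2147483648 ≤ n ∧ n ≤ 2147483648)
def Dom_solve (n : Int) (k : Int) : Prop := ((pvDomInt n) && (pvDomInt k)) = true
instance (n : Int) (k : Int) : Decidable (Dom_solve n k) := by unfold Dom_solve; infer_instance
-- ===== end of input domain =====

-- B replaces A's four-way-parity tail recursion by a closed-form formula (objective: faster, constant-time).

-- ===== PORT A =====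
-- Literal port of A's recursion; the guard 'k - 1 ≤ 0' (Python: 'k - 1 == 0') only
-- totalizes the function: for k ≤ 0 the Python recursion never returns (RecursionError),
-- those inputs are excluded by Pre_solve; for k ≥ 1 the guard coincides with 'k - 1 == 0'.
def solve (n : Int) (k : Int) : Int × Int :=
  if k - 1 ≤ 0 then
    (PySem.Int.floordiv n 2, PySem.Int.floordiv (n - 1) 2)
  else if PySem.Int.mod n 2 = 0 then
    if PySem.Int.mod (k - 1) 2 = 0 then
      solve (PySem.Int.floordiv n 2 - 1) (PySem.Int.floordiv (k - 1) 2)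
    else
      solve (PySem.Int.floordiv n 2) (PySem.Int.floordiv (k - 1) 2 + 1)
  else if PySem.Int.mod (k - 1) 2 = 0 then
    solve (PySem.Int.floordiv n 2) (PySem.Int.floordiv (k - 1) 2)
  else
    solve (PySem.Int.floordiv n 2) (PySem.Int.floordiv (k - 1) 2 + 1)
termination_by k.toNat
decreasing_by
  all_goals rw [PySem.Int.floordiv_eq_ediv_of_pos (by norm_num)]; omega

-- ===== PORT B =====
-- Port of Source B. 'k.bit_length() - 1' is Nat subtraction here; it agrees with Python
-- for k ≥ 1 (inside Pre_solve), where bit_length ≥ 1.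
def solve_alt (n : Int) (k : Int) : Int × Int :=
  let d : Nat := PySem.Int.bitLength k - 1
  let p : Int := 2 ^ d
  let m : Int := PySem.Int.floordiv (n + 2 * p - k) p
  (PySem.Int.floordiv (m - 1) 2, PySem.Int.floordiv (m - 2) 2)

-- ===== PRECONDITION & SPEC =====
-- For k ≤ 0 Python's A recurses forever (RecursionError): excluded.
def Pre_solve (n : Int) (k : Int) : Prop := 1 ≤ k
instance (n : Int) (k : Int) : Decidable (Pre_solve n k) := by unfold Pre_solve; infer_instance
def pvWitness_solve : Int × Int := (10, 4)

def Spec_solve (n : Int) (k : Int) (out : Int × Int) : Prop := out = solve_alt n k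
instance (n : Int) (k : Int) (out : Int × Int) : Decidable (Spec_solve n k out) := by unfold Spec_solve; infer_instance

-- ===== CLAIM (what is proved, stated in full; the proofs are below) =====
def Claim_equal_solve : Prop := ∀ (n : Int) (k : Int), Dom_solve n k → Pre_solve n k → Spec_solve n k (solve n k)

-- ===== LEMMAS AND PROOFS =====

-- base case: B at k = 1
lemma solve_alt_one (n : Int) : solve_alt n 1 =
    (PySem.Int.floordiv n 2, PySem.Int.floordiv (n - 1) 2) := by
  show (PySem.Int.floordiv (PySem.Int.floordiv (n + 2 * 2 ^ (PySem.Int.bitLength 1 - 1) - 1) (2 ^ (PySem.Int.bitLength 1 - 1)) - 1) 2,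
        PySem.Int.floordiv (PySem.Int.floordiv (n + 2 * 2 ^ (PySem.Int.bitLength 1 - 1) - 1) (2 ^ (PySem.Int.bitLength 1 - 1)) - 2) 2) = _
  have h1 : PySem.Int.bitLength 1 = 1 := by decide
  rw [h1]
  norm_num
  omega

-- step case: B is invariant under A's parent-to-child move (child k is k/2)
lemma solve_alt_child (n k : Int) (hk : 2 ≤ k) :
    solve_alt (if n % 2 = 0 ∧ k % 2 = 1 then n / 2 - 1 else n / 2) (k / 2) = solve_alt n k := by
  have hkpos : (0:Int) < k := by omega
  have hhalf : (1:Int) ≤ k / 2 := by omega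
  -- bit lengths
  have hb : PySem.Int.bitLength k = PySem.Int.bitLength (k / 2) + 1 := by
    have := PySem.Int.bitLength_of_pos (n := k) hkpos
    rwa [PySem.Int.floordiv_eq_ediv_of_pos (by norm_num)] at this
  have hb2 : 1 ≤ PySem.Int.bitLength (k / 2) := by
    by_contra h
    have h0 : PySem.Int.bitLength (k / 2) = 0 := by omega
    have := PySem.Int.lt_two_pow_bitLength (k / 2)
    rw [h0] at this
    simp at this
    omega
  set e : Nat := PySem.Int.bitLength (k / 2) - 1 with he
  have hde : PySem.Int.bitLength k - 1 = e + 1 := by omega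
  show (PySem.Int.floordiv (PySem.Int.floordiv (_ + 2 * 2 ^ e - k / 2) (2 ^ e) - 1) 2,
        PySem.Int.floordiv (PySem.Int.floordiv (_ + 2 * 2 ^ e - k / 2) (2 ^ e) - 2) 2) =
       (PySem.Int.floordiv (PySem.Int.floordiv (n + 2 * 2 ^ (PySem.Int.bitLength k - 1) - k) (2 ^ (PySem.Int.bitLength k - 1)) - 1) 2,
        PySem.Int.floordiv (PySem.Int.floordiv (n + 2 * 2 ^ (PySem.Int.bitLength k - 1) - k) (2 ^ (PySem.Int.bitLength k - 1)) - 2) 2)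
  rw [hde]
  have hE : (0:Int) < 2 ^ e := by positivity
  have hpow : ((2:Int) ^ (e + 1)) = 2 * 2 ^ e := by rw [pow_succ]; ring
  have key : PySem.Int.floordiv ((if n % 2 = 0 ∧ k % 2 = 1 then n / 2 - 1 else n / 2) + 2 * 2 ^ e - k / 2) (2 ^ e)
           = PySem.Int.floordiv (n + 2 * 2 ^ (e + 1) - k) (2 ^ (e + 1)) := by
    rw [PySem.Int.floordiv_eq_ediv_of_pos (by positivity), PySem.Int.floordiv_eq_ediv_of_pos (by positivity)]
    rw [hpow, ← Int.ediv_ediv_of_nonneg (by norm_num : (0:Int) ≤ 2)]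
    congr 1
    split_ifs with h
    · omega
    · omega
  rw [key]

-- main equivalence by strong induction on k
lemma solve_eq_alt : ∀ (K : Nat) (n k : Int), k.toNat ≤ K → 1 ≤ k → solve n k = solve_alt n k := by
  intro K
  induction K with
  | zero => intro n k hK hk; omega
  | succ K ih =>
    intro n k hK hk
    rw [solve]
    by_cases h1 : k - 1 ≤ 0
    · have : k = 1 := by omega
      subst this
      simp [solve_alt_one]
    · simp only [if_neg h1]
      have hk2 : 2 ≤ k := by omega
      rw [PySem.Int.mod_eq_emod_of_pos (by norm_num), PySem.Int.mod_eq_emod_of_pos (by norm_num),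
          PySem.Int.floordiv_eq_ediv_of_pos (a := n) (by norm_num),
          PySem.Int.floordiv_eq_ediv_of_pos (a := k - 1) (by norm_num)]
      have hchild := solve_alt_child n k hk2
      split_ifs with hn hkp hkp
      · -- n even, k-1 even (k odd)
        rw [ih (n / 2 - 1) ((k - 1) / 2) (by omega) (by omega)]
        rw [show (k - 1) / 2 = k / 2 by omega]
        rw [show n / 2 - 1 = (if n % 2 = 0 ∧ k % 2 = 1 then n / 2 - 1 else n / 2) by
          rw [if_pos ⟨hn, by omega⟩]]
        exact hchild
      · -- n even, k-1 odd (k even)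
        rw [ih (n / 2) ((k - 1) / 2 + 1) (by omega) (by omega)]
        rw [show (k - 1) / 2 + 1 = k / 2 by omega]
        rw [show n / 2 = (if n % 2 = 0 ∧ k % 2 = 1 then n / 2 - 1 else n / 2) by
          rw [if_neg (by omega)]]
        exact hchild
      · -- n odd, k-1 even (k odd)
        rw [ih (n / 2) ((k - 1) / 2) (by omega) (by omega)]
        rw [show (k - 1) / 2 = k / 2 by omega]
        rw [show n / 2 = (if n % 2 = 0 ∧ k % 2 = 1 then n / 2 - 1 else n / 2) by
          rw [if_neg (by omega)]]
        exact hchild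
      · -- n odd, k-1 odd (k even)
        rw [ih (n / 2) ((k - 1) / 2 + 1) (by omega) (by omega)]
        rw [show (k - 1) / 2 + 1 = k / 2 by omega]
        rw [show n / 2 = (if n % 2 = 0 ∧ k % 2 = 1 then n / 2 - 1 else n / 2) by
          rw [if_neg (by omega)]]
        exact hchild

-- ===== VERDICT (by name: the statement is the Claim_ definition above) =====
theorem solve_spec : Claim_equal_solve := by
  intro n k _ hpre
  exact solve_eq_alt k.toNat n k le_rfl hpre
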